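-- pv_equiv track=rewrite | github.com/aims-foundations/torch_measure | data/afrieval_data/scripts/03_build_response_matrix_from_mined.py | parse_conll_predictions
-- ===== SOURCE A (Python) =====
-- def parse_conll_predictions(text, n_cols_expected=None):
--     """Parse CoNLL-format NER predictions.
--
--     Handles:
--       - 2-column: token predicted_tag  (prediction-only files)
--       - 3-column: token gold_tag predicted_tag  (biLSTM_CRF files)
--
--     Returns list of sentences, where each sentence is a list of dicts:
--       [{"token": str, "gold": str or None, "predicted": str}, ...]
--
--     Blank lines separate sentences.
--     """
--     sentences = []
--     current_sentence = []
--
--     for line in text.split("\n"):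
--         line = line.strip()
--         if not line:
--             if current_sentence:
--                 sentences.append(current_sentence)
--                 current_sentence = []
--             continue
--
--         parts = line.split()
--         if len(parts) == 3:
--             # token gold predicted
--             current_sentence.append({
--                 "token": parts[0],
--                 "gold": parts[1],
--                 "predicted": parts[2],
--             })
--         elif len(parts) == 2:
--             # token predicted (or token gold -- depends on context)
--             current_sentence.append({
--                 "token": parts[0],
--                 "gold": None,
--                 "predicted": parts[1],
--             })
--         elif len(parts) == 1:
--             # Just a token with no tag (skip or treat as O)
--             current_sentence.append({
--                 "token": parts[0],
--                 "gold": None,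
--                 "predicted": "O",
--             })
--         # Lines with more parts: try to recover
--         elif len(parts) > 3:
--             current_sentence.append({
--                 "token": parts[0],
--                 "gold": parts[-2] if len(parts) >= 3 else None,
--                 "predicted": parts[-1],
--             })
--
--     if current_sentence:
--         sentences.append(current_sentence)
--
--     return sentences
-- ===== SOURCE B (Python) =====
-- def _parse_line(line):
--     """Parse one non-blank (already stripped) line into a token dict."""
--     parts = line.split()
--     if len(parts) >= 3:
--         return {"token": parts[0], "gold": parts[-2], "predicted": parts[-1]}
--     if len(parts) == 2:
--         return {"token": parts[0], "gold": None, "predicted": parts[1]}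
--     return {"token": parts[0], "gold": None, "predicted": "O"}
--
--
-- def parse_conll_predictions(text, n_cols_expected=None):
--     """Group the stripped lines into maximal runs of non-blank lines
--     (two-pointer scan); each run becomes one sentence."""
--     stripped = [ln.strip() for ln in text.split("\n")]
--     sentences = []
--     i, n = 0, len(stripped)
--     while i < n:
--         if not stripped[i]:
--             i += 1
--             continue
--         j = i
--         while j < n and stripped[j]:
--             j += 1
--         sentences.append([_parse_line(ln) for ln in stripped[i:j]])
--         i = j
--     return sentences
-- ===== Notes on version B (the rewrite author's own statement) =====
-- stated objective: alternative
-- what changed: Replaced A's single pass with a mutable current_sentence accumulator and end-of-loop flush by a two-pointer scan that groups the stripped lines into maximal runs of non-blank lines and maps a per-line parse helper over each run.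
import Mathlib
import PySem

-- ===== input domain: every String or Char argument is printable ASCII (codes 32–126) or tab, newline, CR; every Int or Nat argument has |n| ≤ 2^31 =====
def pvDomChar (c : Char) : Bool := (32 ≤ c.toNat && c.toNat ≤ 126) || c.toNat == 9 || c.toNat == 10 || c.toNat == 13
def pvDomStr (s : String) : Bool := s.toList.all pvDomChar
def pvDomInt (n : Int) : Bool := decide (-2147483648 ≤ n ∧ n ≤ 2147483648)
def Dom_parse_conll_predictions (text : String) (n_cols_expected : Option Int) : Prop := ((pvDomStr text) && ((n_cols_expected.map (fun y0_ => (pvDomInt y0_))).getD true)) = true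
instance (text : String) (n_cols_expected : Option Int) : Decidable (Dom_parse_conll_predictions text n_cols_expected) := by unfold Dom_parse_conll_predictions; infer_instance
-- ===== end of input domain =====

-- B groups the stripped lines into maximal runs of non-blank lines instead of A's
-- single pass with a mutable current-sentence accumulator and end-of-loop flush
-- (objective: alternative decomposition; same O(n) cost).

-- ===== PORT A =====
-- the zero-or-one dicts appended by A's elif chain for one non-blank line
-- (indices parts[0], parts[1], parts[2], parts[-2], parts[-1] are in range in their
-- branches, so pyGetD with default "" is exact)
def pvRowA (parts : List String) : List (List (String × Option String)) :=
  if parts.length = 3 then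
    [[("token", some (PySem.List.pyGetD parts 0 "")),
      ("gold", some (PySem.List.pyGetD parts 1 "")),
      ("predicted", some (PySem.List.pyGetD parts 2 ""))]]
  else if parts.length = 2 then
    [[("token", some (PySem.List.pyGetD parts 0 "")),
      ("gold", none),
      ("predicted", some (PySem.List.pyGetD parts 1 ""))]]
  else if parts.length = 1 then
    [[("token", some (PySem.List.pyGetD parts 0 "")),
      ("gold", none),
      ("predicted", some "O")]]
  else if parts.length > 3 then
    [[("token", some (PySem.List.pyGetD parts 0 "")),
      ("gold", if parts.length ≥ 3 then some (PySem.List.pyGetD parts (-2) "") else none),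
      ("predicted", some (PySem.List.pyGetD parts (-1) ""))]]
  else []

-- one iteration of A's for-loop, acting on (sentences, current_sentence),
-- after 'line = line.strip()'
def pvStep2 (st : List (List (List (String × Option String))) × List (List (String × Option String)))
    (l : String) : List (List (List (String × Option String))) × List (List (String × Option String)) :=
  if l = "" then
    if st.2 ≠ [] then (st.1 ++ [st.2], []) else st
  else
    (st.1, st.2 ++ pvRowA (PySem.Str.split₀ l))

def parse_conll_predictions (text : String) (n_cols_expected : Option Int) :
    List (List (List (String × Option String))) :=
  let st := ((PySem.Str.split? text "\n").getD []).foldl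
    (fun st line => pvStep2 st (PySem.Str.strip line)) ([], [])
  if st.2 ≠ [] then st.1 ++ [st.2] else st.1

-- ===== PORT B =====
-- _parse_line of Source B (the line is non-blank there, so parts ≠ [] and parts[0],
-- parts[1], parts[-2], parts[-1] are in range; pyGetD with default "" is exact)
def pvParseLine (line : String) : List (String × Option String) :=
  let parts := PySem.Str.split₀ line
  if parts.length ≥ 3 then
    [("token", some (PySem.List.pyGetD parts 0 "")),
     ("gold", some (PySem.List.pyGetD parts (-2) "")),
     ("predicted", some (PySem.List.pyGetD parts (-1) ""))]
  else if parts.length = 2 then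
    [("token", some (PySem.List.pyGetD parts 0 "")),
     ("gold", none),
     ("predicted", some (PySem.List.pyGetD parts 1 ""))]
  else
    [("token", some (PySem.List.pyGetD parts 0 "")),
     ("gold", none),
     ("predicted", some "O")]

-- Source B's two-pointer while loop: skip blank lines, take a maximal run of
-- non-blank lines as one sentence, continue after the run
def pvSentences : List String → List (List (List (String × Option String)))
  | [] => []
  | l :: rest =>
    if l = "" then pvSentences rest
    else ((l :: rest.takeWhile (· != "")).map pvParseLine) ::
      pvSentences (rest.dropWhile (· != ""))
termination_by ls => ls.length
decreasing_by
  · simp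
  · exact Nat.lt_succ_of_le (List.length_dropWhile_le _ _)

def parse_conll_predictions_alt (text : String) (n_cols_expected : Option Int) :
    List (List (List (String × Option String))) :=
  pvSentences (((PySem.Str.split? text "\n").getD []).map PySem.Str.strip)

-- ===== PRECONDITION & SPEC =====
def Spec_parse_conll_predictions (text : String) (n_cols_expected : Option Int) (out : List (List (List (String × Option String)))) : Prop := out = parse_conll_predictions_alt text n_cols_expected
instance (text : String) (n_cols_expected : Option Int) (out : List (List (List (String × Option String)))) : Decidable (Spec_parse_conll_predictions text n_cols_expected out) := by unfold Spec_parse_conll_predictions; infer_instance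

-- ===== CLAIM (what is proved, stated in full; the proofs are below) =====
def Claim_equal_parse_conll_predictions : Prop := ∀ (text : String) (n_cols_expected : Option Int), Dom_parse_conll_predictions text n_cols_expected → Spec_parse_conll_predictions text n_cols_expected (parse_conll_predictions text n_cols_expected)

-- ===== LEMMAS AND PROOFS =====

-- A's loop, written as structural recursion on the (stripped) lines, with the
-- pending current sentence as a parameter and the final flush built in
def pvPend (cur : List (List (String × Option String))) :
    List String → List (List (List (String × Option String)))
  | [] => if cur = [] then [] else [cur]
  | l :: rest =>
    if l = "" then
      if cur = [] then pvPend [] rest else cur :: pvPend [] rest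
    else pvPend (cur ++ pvRowA (PySem.Str.split₀ l)) rest

-- A's fold equals pvPend
theorem pvFold_eq_pend (ls : List String)
    (acc : List (List (List (String × Option String))))
    (cur : List (List (String × Option String))) :
    (let st := ls.foldl pvStep2 (acc, cur)
     if st.2 ≠ [] then st.1 ++ [st.2] else st.1) = acc ++ pvPend cur ls := by
  induction ls generalizing acc cur with
  | nil =>
    simp only [List.foldl_nil, pvPend]
    by_cases h : cur = [] <;> simp [h]
  | cons l rest ih =>
    simp only [List.foldl_cons, pvPend, pvStep2]
    by_cases hl : l = ""
    · by_cases hc : cur = []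
      · simpa [hl, hc] using ih acc []
      · simp only [hl, hc, if_pos rfl, ne_eq, not_false_eq_true, if_true]
        rw [ih (acc ++ [cur]) []]
        simp
    · simp only [if_neg hl]
      exact ih acc (cur ++ pvRowA (PySem.Str.split₀ l))

-- any split₀.go call with a pending word, a collected word, or a non-space
-- character still to come returns a nonempty list
theorem pvGo_ne_nil (m : List Char) (cur : List Char) (acc : List (List Char))
    (h : acc ≠ [] ∨ cur ≠ [] ∨ ∃ c ∈ m, PySem.Chars.isspace c = false) :
    PySem.Chars.split₀.go m cur acc ≠ [] := by
  induction m generalizing cur acc with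
  | nil =>
    simp only [PySem.Chars.split₀.go]
    rcases h with h | h | h
    · by_cases hc : cur.isEmpty <;> simp [hc, h]
    · simp [List.isEmpty_eq_false_iff.mpr h]
    · simp at h
  | cons c rest ih =>
    simp only [PySem.Chars.split₀.go]
    by_cases hs : PySem.Chars.isspace c = true
    · by_cases hc : cur.isEmpty
      · simp only [hs, hc, if_true]
        apply ih
        rcases h with h | h | h
        · exact Or.inl h
        · simp [List.isEmpty_iff.mp hc] at h
        · rcases h with ⟨d, hd, hd2⟩
          rcases List.mem_cons.mp hd with rfl | hd
          · simp [hs] at hd2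
          · exact Or.inr (Or.inr ⟨d, hd, hd2⟩)
      · simp only [hs, hc, if_true, Bool.false_eq_true, if_false]
        exact ih [] (cur.reverse :: acc) (Or.inl (by simp))
    · simp only [hs, Bool.false_eq_true, if_false]
      exact ih (c :: cur) acc (Or.inr (Or.inl (by simp)))

-- a non-empty stripped string splits into at least one word
theorem pvStrip_split_ne (s : String) (h : PySem.Str.strip s ≠ "") :
    PySem.Str.split₀ (PySem.Str.strip s) ≠ [] := by
  intro hsplit
  have hmap := PySem.Str.split₀_map_toList (PySem.Str.strip s)
  rw [hsplit] at hmap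
  have htl : (PySem.Str.strip s).toList ≠ [] := by
    intro hnil
    exact h (String.toList_eq_nil_iff.mp hnil)
  rw [PySem.Str.toList_strip] at hmap htl
  -- strip s = (dropWhile isspace (lstrip s).reverse).reverse; its head on the
  -- reverse side is a non-space character
  unfold PySem.Chars.strip PySem.Chars.rstrip at hmap htl
  set t := (PySem.Chars.lstrip s.toList).reverse with ht
  have hd : t.dropWhile PySem.Chars.isspace ≠ [] := by
    intro hnil; exact htl (by simp [hnil])
  have hhead : PySem.Chars.isspace ((t.dropWhile PySem.Chars.isspace).head hd) = false :=
    List.head_dropWhile_not PySem.Chars.isspace hd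
  have hmem : (t.dropWhile PySem.Chars.isspace).head hd ∈
      (t.dropWhile PySem.Chars.isspace).reverse := by
    simp [List.head_mem]
  exact pvGo_ne_nil _ [] [] (Or.inr (Or.inr ⟨_, hmem, hhead⟩)) hmap.symm

-- on a non-blank line with a nonempty word list, A's appended dict equals B's
theorem pvRowA_eq_parseLine (l : String) (hne : PySem.Str.split₀ l ≠ []) :
    pvRowA (PySem.Str.split₀ l) = [pvParseLine l] := by
  unfold pvRowA pvParseLine
  rcases hp : PySem.Str.split₀ l with _ | ⟨a, _ | ⟨b, _ | ⟨c, _ | ⟨d, rest⟩⟩⟩⟩ <;>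
    simp only [hp] at hne ⊢
  · exact absurd rfl hne
  · simp [PySem.List.pyGetD, PySem.List.pyGet?, PySem.List.pyIdx?]
  · simp [PySem.List.pyGetD, PySem.List.pyGet?, PySem.List.pyIdx?]
  · simp [PySem.List.pyGetD, PySem.List.pyGet?, PySem.List.pyIdx?]
  · have h4 : (a :: b :: c :: d :: rest).length > 3 := by simp
    have hge : (a :: b :: c :: d :: rest).length ≥ 3 := by simp
    have h3' : ¬((a :: b :: c :: d :: rest).length = 3) := by simp
    have h2' : ¬((a :: b :: c :: d :: rest).length = 2) := by simp
    have h1' : ¬((a :: b :: c :: d :: rest).length = 1) := by simp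
    simp only [h3', h2', h1', h4, hge, if_pos, if_neg, not_false_eq_true,
      ite_true, ite_false, ge_iff_le, le_refl]

-- property every stripped line has: non-blank implies a nonempty word list
def pvGood (l : String) : Prop := l ≠ "" → PySem.Str.split₀ l ≠ []

-- pvPend with a nonempty pending sentence: the pending sentence is completed by
-- the leading run of non-blank lines, then the loop continues fresh
theorem pvPend_nonempty (ls : List String) (cur : List (List (String × Option String)))
    (hc : cur ≠ []) (hg : ∀ l ∈ ls, pvGood l) :
    pvPend cur ls = (cur ++ (ls.takeWhile (· != "")).map pvParseLine) ::
      pvPend [] (ls.dropWhile (· != "")) := by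
  induction ls generalizing cur with
  | nil => simp [pvPend, hc]
  | cons l rest ih =>
    by_cases hl : l = ""
    · subst hl
      simp [pvPend, hc]
    · have hrow := pvRowA_eq_parseLine l (hg l (by simp) hl)
      have hbl : (l != "") = true := by simp [hl]
      simp only [pvPend, if_neg hl, hrow, List.takeWhile_cons, List.dropWhile_cons, hbl,
        if_true]
      rw [ih (cur ++ [pvParseLine l]) (by simp) (fun x hx => hg x (by simp [hx]))]
      simp

-- pvPend with empty pending sentence is exactly B's run-grouping recursion
theorem pvPend_eq_sentences (ls : List String) (hg : ∀ l ∈ ls, pvGood l) :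
    pvPend [] ls = pvSentences ls := by
  induction ls using pvSentences.induct with
  | case1 => simp [pvPend, pvSentences]
  | case2 rest ih =>
    simp only [pvPend, if_pos rfl]
    rw [pvSentences]
    simp only [if_pos rfl]
    exact ih (fun x hx => hg x (by simp [hx]))
  | case3 l rest hl ih =>
    have hrow := pvRowA_eq_parseLine l (hg l (by simp) hl)
    simp only [pvPend, if_neg hl, List.nil_append, hrow]
    rw [pvPend_nonempty rest [pvParseLine l] (by simp)
      (fun x hx => hg x (by simp [hx]))]
    rw [pvSentences]
    simp only [if_neg hl]
    rw [ih (fun x hx => hg x (List.mem_cons_of_mem l ((List.dropWhile_sublist _).mem hx)))]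
    simp

-- ===== VERDICT (by name: the statement is the Claim_ definition above) =====
theorem parse_conll_predictions_spec : Claim_equal_parse_conll_predictions := by
  intro text n_cols_expected _
  unfold Spec_parse_conll_predictions parse_conll_predictions parse_conll_predictions_alt
  set lines := (PySem.Str.split? text "\n").getD [] with hlines
  have hmapfold : lines.foldl (fun st line => pvStep2 st (PySem.Str.strip line)) ([], []) =
      (lines.map PySem.Str.strip).foldl pvStep2 ([], []) := by
    rw [List.foldl_map]
  simp only [hmapfold]
  rw [pvFold_eq_pend (lines.map PySem.Str.strip) [] []]
  rw [pvPend_eq_sentences]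
  · simp
  · intro l hl
    rcases List.mem_map.mp hl with ⟨s, _, rfl⟩
    exact pvStrip_split_ne s
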